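-- pv_equiv track=rewrite | github.com/jim-my/tinty | src/tinty/tinty.py | _calculate_group_nesting_depth
-- ===== SOURCE A (Python) =====
-- def _calculate_group_nesting_depth(  # noqa: PLR6301
--     pattern_str: str
-- ) -> dict[int, int]:
--     """Calculate nesting depth for each capture group in a regex pattern.
--
--     Returns a dict mapping group number to nesting depth.
--     Group 0 (entire match) has depth 0, first-level groups have depth 1, etc.
--     """
--     depth_map = {0: 0}  # Group 0 is the entire match
--     current_depth = 0
--     group_num = 0
--     i = 0
--
--     while i < len(pattern_str):
--         char = pattern_str[i]
--
--         # Skip escaped characters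
--         if char == "\\" and i + 1 < len(pattern_str):
--             i += 2
--             continue
--
--         # Skip character classes
--         if char == "[":
--             i += 1
--             while i < len(pattern_str) and pattern_str[i] != "]":
--                 if pattern_str[i] == "\\" and i + 1 < len(pattern_str):
--                     i += 2
--                 else:
--                     i += 1
--             i += 1
--             continue
--
--         # Handle opening parenthesis
--         if char == "(":
--             # Check if it's a non-capturing group
--             if i + 1 < len(pattern_str) and pattern_str[i + 1] == "?":
--                 # Non-capturing group, don't increment group_num
--                 # But still increase depth for nested groups
--                 current_depth += 1
--             else:
--                 # Capturing group
--                 current_depth += 1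
--                 group_num += 1
--                 depth_map[group_num] = current_depth
--
--         elif char == ")":
--             current_depth -= 1
--
--         i += 1
--
--     return depth_map
-- ===== SOURCE B (Python) =====
-- def _calculate_group_nesting_depth(  # noqa: PLR6301
--     pattern_str: str
-- ) -> dict[int, int]:
--     """Two-pass version: lex the pattern into paren tokens, then fold them."""
--     # Pass 1: lex into tokens. True = non-capturing '(', False = capturing '(',
--     # None = ')'.  Escapes and character classes are consumed here.
--     tokens = []
--     n = len(pattern_str)
--     i = 0
--     while i < n:
--         c = pattern_str[i]
--         if c == "\\" and i + 1 < n: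
--             i += 2
--             continue
--         if c == "[":
--             i += 1
--             while i < n and pattern_str[i] != "]":
--                 if pattern_str[i] == "\\" and i + 1 < n:
--                     i += 2
--                 else:
--                     i += 1
--             i += 1
--             continue
--         if c == "(":
--             tokens.append(i + 1 < n and pattern_str[i + 1] == "?")
--         elif c == ")":
--             tokens.append(None)
--         i += 1
--
--     # Pass 2: fold the token list.
--     depth_map = {0: 0}
--     current_depth = 0
--     group_num = 0
--     for t in tokens:
--         if t is None:
--             current_depth -= 1
--         else:
--             current_depth += 1
--             if not t:
--                 group_num += 1
--                 depth_map[group_num] = current_depth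
--     return depth_map
-- ===== Notes on version B (the rewrite author's own statement) =====
-- stated objective: alternative
-- what changed: B splits A's single stateful scan into two passes: a lexer that consumes escapes and character classes and emits a reduced token list of significant parentheses (tagged capturing or non-capturing), then a simple fold over that token list maintaining depth and group number.
import Mathlib
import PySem

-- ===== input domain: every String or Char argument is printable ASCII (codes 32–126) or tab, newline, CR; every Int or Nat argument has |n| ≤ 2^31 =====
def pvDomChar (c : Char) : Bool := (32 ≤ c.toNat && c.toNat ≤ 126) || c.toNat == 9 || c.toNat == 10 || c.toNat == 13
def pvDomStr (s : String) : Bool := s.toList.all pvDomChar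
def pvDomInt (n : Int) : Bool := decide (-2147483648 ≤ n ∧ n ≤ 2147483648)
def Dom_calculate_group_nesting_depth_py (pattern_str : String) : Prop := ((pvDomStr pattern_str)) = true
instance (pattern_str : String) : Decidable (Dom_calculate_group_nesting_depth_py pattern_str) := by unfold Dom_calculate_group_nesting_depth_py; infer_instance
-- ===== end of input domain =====

-- B rewrites A's single stateful scan as a lexer producing a paren-token list plus a fold over it (objective: alternative decomposition).

-- ===== PORT A =====
-- A's inner while loop: consume up to and including the first unescaped ']'
def pvSkipClassA : List Char → List Char
  | [] => []
  | c :: rest =>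
    if c = ']' then rest
    else if c = '\\' then
      match rest with
      | _ :: rest' => pvSkipClassA rest'
      | [] => []
    else pvSkipClassA rest

theorem pvSkipClassA_length : ∀ cs : List Char, (pvSkipClassA cs).length ≤ cs.length := by
  intro cs
  fun_induction pvSkipClassA cs <;> simp_all <;> omega

-- A's main while loop, state = (depth_map, current_depth, group_num)
def pvLoopA : List Char → PySem.Dict Int Int → Int → Int → PySem.Dict Int Int
  | [], dm, _, _ => dm
  | c :: rest, dm, cd, gn =>
    if c = '\\' ∧ rest ≠ [] then pvLoopA rest.tail dm cd gn
    else if c = '[' then pvLoopA (pvSkipClassA rest) dm cd gn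
    else if c = '(' then
      if rest.head? = some '?' then pvLoopA rest dm (cd + 1) gn
      else pvLoopA rest (dm.insert (gn + 1) (cd + 1)) (cd + 1) (gn + 1)
    else if c = ')' then pvLoopA rest dm (cd - 1) gn
    else pvLoopA rest dm cd gn
termination_by cs => cs.length
decreasing_by all_goals simp <;> exact pvSkipClassA_length _

def calculate_group_nesting_depth_py (pattern_str : String) : List (Int × Int) :=
  (pvLoopA pattern_str.toList (PySem.Dict.ofList [(0, 0)]) 0 0).items

-- ===== PORT B =====
-- B's pass-1 character-class skip (B's own inner loop, same consumption rule)
def pvSkipClassB : List Char → List Char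
  | [] => []
  | c :: rest =>
    if c = ']' then rest
    else if c = '\\' then
      match rest with
      | _ :: rest' => pvSkipClassB rest'
      | [] => []
    else pvSkipClassB rest

theorem pvSkipClassB_length : ∀ cs : List Char, (pvSkipClassB cs).length ≤ cs.length := by
  intro cs
  fun_induction pvSkipClassB cs <;> simp_all <;> omega

-- B's pass 1: lex into tokens (some true = non-capturing '(', some false = capturing '(', none = ')')
def pvLexB : List Char → List (Option Bool)
  | [] => []
  | c :: rest =>
    if c = '\\' ∧ rest ≠ [] then pvLexB rest.tail
    else if c = '[' then pvLexB (pvSkipClassB rest)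
    else if c = '(' then some (rest.head? = some '?') :: pvLexB rest
    else if c = ')' then none :: pvLexB rest
    else pvLexB rest
termination_by cs => cs.length
decreasing_by all_goals simp <;> exact pvSkipClassB_length _

-- B's pass 2: one fold step per token
def pvStepB (st : PySem.Dict Int Int × Int × Int) (t : Option Bool) : PySem.Dict Int Int × Int × Int :=
  match t with
  | none => (st.1, st.2.1 - 1, st.2.2)
  | some true => (st.1, st.2.1 + 1, st.2.2)
  | some false => (st.1.insert (st.2.2 + 1) (st.2.1 + 1), st.2.1 + 1, st.2.2 + 1)

def calculate_group_nesting_depth_py_alt (pattern_str : String) : List (Int × Int) :=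
  ((pvLexB pattern_str.toList).foldl pvStepB (PySem.Dict.ofList [(0, 0)], 0, 0)).1.items

-- ===== PRECONDITION & SPEC =====
def Spec_calculate_group_nesting_depth_py (pattern_str : String) (out : List (Int × Int)) : Prop := out = calculate_group_nesting_depth_py_alt pattern_str
instance (pattern_str : String) (out : List (Int × Int)) : Decidable (Spec_calculate_group_nesting_depth_py pattern_str out) := by unfold Spec_calculate_group_nesting_depth_py; infer_instance

-- ===== CLAIM (what is proved, stated in full; the proofs are below) =====
def Claim_equal_calculate_group_nesting_depth_py : Prop := ∀ (pattern_str : String), Dom_calculate_group_nesting_depth_py pattern_str → Spec_calculate_group_nesting_depth_py pattern_str (calculate_group_nesting_depth_py pattern_str)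

-- ===== LEMMAS AND PROOFS =====
theorem pvSkipClass_eq (cs : List Char) : pvSkipClassA cs = pvSkipClassB cs := by
  fun_induction pvSkipClassA cs <;> rw [pvSkipClassB.eq_def] <;> simp_all

theorem pvLoopA_eq_foldl (cs : List Char) (dm : PySem.Dict Int Int) (cd gn : Int) :
    pvLoopA cs dm cd gn = ((pvLexB cs).foldl pvStepB (dm, cd, gn)).1 := by
  fun_induction pvLoopA cs dm cd gn <;> rw [pvLexB.eq_def] <;> simp_all [pvStepB, pvSkipClass_eq] <;>
    (split <;> simp_all)

-- ===== VERDICT (by name: the statement is the Claim_ definition above) =====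
theorem calculate_group_nesting_depth_py_spec : Claim_equal_calculate_group_nesting_depth_py := by
  intro s _
  unfold Spec_calculate_group_nesting_depth_py calculate_group_nesting_depth_py calculate_group_nesting_depth_py_alt
  rw [pvLoopA_eq_foldl]
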